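-- pv_equiv track=rewrite | github.com/Coriana/RamblingGPT | data/whispering/prepare_gpt.py | add_caseifer
-- ===== SOURCE A (Python) =====
-- def add_caseifer(text):
--     tokenlist = set("\n\" !$&'#,=-<>*@.:;[]?0123456789ABCDEFGHIJKLMNOPQRSTUVWXYZabcdefghijklmnopqrstuvwxyz")
--     upperlist = set("ABCDEFGHIJKLMNOPQRSTUVWXYZ")
--     new_text = ""
--     for char in text:
--         if char in tokenlist:
--             if char in upperlist:
--                 new_text += "^" + char.lower()
--             else:
--                 new_text += char
--         else:
--             continue
--
--     return new_text
-- ===== SOURCE B (Python) =====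
-- TOKENS = set("\n\" !$&'#,=-<>*@.:;[]?0123456789ABCDEFGHIJKLMNOPQRSTUVWXYZabcdefghijklmnopqrstuvwxyz")
--
-- def add_caseifer(text):
--     # stage 1: drop disallowed characters in one filter pass
--     kept = ''.join(filter(TOKENS.__contains__, text))
--     # stage 2: 26 global replace passes rewrite each uppercase letter to '^'+lowercase
--     # (correct because replacements never introduce uppercase letters)
--     for u in "ABCDEFGHIJKLMNOPQRSTUVWXYZ":
--         kept = kept.replace(u, "^" + u.lower())
--     return kept
-- ===== Notes on version B (the rewrite author's own statement) =====
-- stated objective: faster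
-- what changed: Replaces A's single Python-level loop with per-character membership tests and a case branch by two stages: one filter pass keeping allowed characters, then 26 whole-string str.replace passes (one per uppercase letter) rewriting it to caret plus its lowercase form; the per-character work moves into C-level builtins.
import Mathlib
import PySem

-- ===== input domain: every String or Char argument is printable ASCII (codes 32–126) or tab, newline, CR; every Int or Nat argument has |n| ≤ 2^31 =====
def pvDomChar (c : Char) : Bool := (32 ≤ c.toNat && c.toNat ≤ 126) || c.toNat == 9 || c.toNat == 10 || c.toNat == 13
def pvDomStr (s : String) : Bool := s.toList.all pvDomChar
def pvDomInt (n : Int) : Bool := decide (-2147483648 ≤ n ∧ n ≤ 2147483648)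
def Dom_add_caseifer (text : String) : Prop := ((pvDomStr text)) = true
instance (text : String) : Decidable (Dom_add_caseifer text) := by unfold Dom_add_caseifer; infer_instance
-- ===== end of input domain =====

-- B replaces A's single per-character branch loop by two stages: a filter pass keeping
-- allowed characters, then 26 whole-string replace passes (one per uppercase letter).

-- ===== PORT A =====
def pvTokenSet : PySem.Set Char :=
  PySem.Set.ofList "\n\" !$&'#,=-<>*@.:;[]?0123456789ABCDEFGHIJKLMNOPQRSTUVWXYZabcdefghijklmnopqrstuvwxyz".toList

def pvUpperSet : PySem.Set Char :=
  PySem.Set.ofList "ABCDEFGHIJKLMNOPQRSTUVWXYZ".toList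

-- strings are accumulated on the List Char side (exact for ASCII; String.append is kernel-opaque)
def add_caseifer (text : String) : String :=
  String.ofList (text.toList.foldl (fun acc c =>
    if PySem.Set.contains pvTokenSet c then
      if PySem.Set.contains pvUpperSet c then acc ++ ['^', PySem.Chars.lowerChar c]
      else acc ++ [c]
    else acc) [])

-- ===== PORT B =====
-- stage 1: filter; stage 2: fold of 26 replace passes, on the List Char side (exact for ASCII)
def add_caseifer_alt (text : String) : String :=
  String.ofList ("ABCDEFGHIJKLMNOPQRSTUVWXYZ".toList.foldl
    (fun l u => PySem.Chars.replace l [u] ['^', PySem.Chars.lowerChar u])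
    (text.toList.filter (fun c => PySem.Set.contains pvTokenSet c)))

-- ===== PRECONDITION & SPEC =====
def Spec_add_caseifer (text : String) (out : String) : Prop := out = add_caseifer_alt text
instance (text : String) (out : String) : Decidable (Spec_add_caseifer text out) := by unfold Spec_add_caseifer; infer_instance

-- ===== CLAIM (what is proved, stated in full; the proofs are below) =====
def Claim_equal_add_caseifer : Prop := ∀ (text : String), Dom_add_caseifer text → Spec_add_caseifer text (add_caseifer text)

-- ===== LEMMAS AND PROOFS =====

-- the per-character emission of A
def pvEmitA (c : Char) : List Char :=
  if PySem.Set.contains pvTokenSet c then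
    (if PySem.Set.contains pvUpperSet c then ['^', PySem.Chars.lowerChar c] else [c])
  else []

-- the per-character effect of one replace pass for uppercase letter u
def pvRep (u c : Char) : List Char := if c == u then ['^', PySem.Chars.lowerChar u] else [c]

lemma pvContains_eq {s : PySem.Set Char} {c : Char} :
    PySem.Set.contains s c = decide (c ∈ s) := by
  simp [PySem.Set.contains]

lemma pvFlatMap_congr_mem {α β : Type} (l : List α) (f g : α → List β)
    (h : ∀ c ∈ l, f c = g c) : l.flatMap f = l.flatMap g := by
  induction l with
  | nil => rfl
  | cons c l ih =>
    simp only [List.flatMap_cons, h c List.mem_cons_self,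
      ih (fun x hx => h x (List.mem_cons_of_mem _ hx))]

-- single-character replace is a flatMap of its per-character effect
lemma pvReplace_go (u : Char) (new : List Char) :
    ∀ (l : List Char) (fuel : Nat), l.length ≤ fuel → ∀ acc,
      PySem.Chars.replace.go [u] new fuel l acc
        = acc.reverse ++ l.flatMap (fun c => if c == u then new else [c]) := by
  intro l
  induction l with
  | nil =>
    intro fuel _ acc
    cases fuel <;> simp [PySem.Chars.replace.go]
  | cons c t ih =>
    intro fuel hle acc
    cases fuel with
    | zero => simp at hle
    | succ f =>
      have ht : t.length ≤ f := by simpa using hle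
      by_cases h : u = c
      · subst h
        simp [PySem.Chars.replace.go, List.isPrefixOf, ih f ht, List.reverse_append]
      · have h1 : ([u].isPrefixOf (c :: t)) = false := by
          simp [List.isPrefixOf]; exact h
        have h2 : ¬ (c = u) := fun hc => h hc.symm
        simp [PySem.Chars.replace.go, h1, ih f ht]
        rw [if_neg h2]
        simp

lemma pvReplace_single (u : Char) (new l : List Char) :
    PySem.Chars.replace l [u] new = l.flatMap (fun c => if c == u then new else [c]) := by
  simp [PySem.Chars.replace, pvReplace_go u new l l.length (le_refl _) []]

-- characters not matched by any pass are left alone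
lemma pvFold_untouched (us : List Char) :
    ∀ l : List Char, (∀ x ∈ l, x ∉ us) →
      us.foldl (fun l u => l.flatMap (pvRep u)) l = l := by
  induction us with
  | nil => intro l _; rfl
  | cons u us ih =>
    intro l hl
    have hstep : l.flatMap (pvRep u) = l := by
      rw [pvFlatMap_congr_mem l (pvRep u) (fun x => [x])]
      · simp
      · intro x hx
        have : x ≠ u := fun he => hl x hx (he ▸ List.mem_cons_self)
        simp [pvRep, this]
    simp only [List.foldl_cons, hstep]
    exact ih l (fun x hx hm => hl x hx (List.mem_cons_of_mem _ hm))

-- the full sequence of passes on a single character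
lemma pvFold_single (us : List Char) :
    ∀ c : Char, ('^' : Char) ∉ us → (∀ u ∈ us, PySem.Chars.lowerChar u ∉ us) →
      us.foldl (fun l u => l.flatMap (pvRep u)) [c]
        = if c ∈ us then ['^', PySem.Chars.lowerChar c] else [c] := by
  induction us with
  | nil => intro c _ _; simp
  | cons u us ih =>
    intro c hcaret hlow
    have hcaret' : ('^' : Char) ∉ us := fun h => hcaret (List.mem_cons_of_mem _ h)
    by_cases h : c = u
    · subst h
      have hstep : ([c].flatMap (pvRep c)) = ['^', PySem.Chars.lowerChar c] := by
        simp [pvRep]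
      simp only [List.foldl_cons, hstep]
      rw [pvFold_untouched us ['^', PySem.Chars.lowerChar c]]
      · simp
      · intro x hx
        rcases List.mem_cons.mp hx with rfl | hx
        · exact hcaret'
        · have hxe : x = PySem.Chars.lowerChar c := by simpa using hx
          subst hxe
          exact fun hm => hlow c List.mem_cons_self (List.mem_cons_of_mem _ hm)
    · have hstep : ([c].flatMap (pvRep u)) = [c] := by simp [pvRep, h]
      simp only [List.foldl_cons, hstep]
      rw [ih c hcaret' (fun v hv hm =>
        hlow v (List.mem_cons_of_mem _ hv) (List.mem_cons_of_mem _ hm))]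
      simp [List.mem_cons, h]

lemma pvUpperBounds : ∀ u ∈ "ABCDEFGHIJKLMNOPQRSTUVWXYZ".toList, 65 ≤ u.toNat ∧ u.toNat ≤ 90 := by
  intro u hu
  have h := List.all_eq_true.mp
    (by decide : "ABCDEFGHIJKLMNOPQRSTUVWXYZ".toList.all
      (fun u => decide (65 ≤ u.toNat) && decide (u.toNat ≤ 90)) = true) u hu
  simp only [Bool.and_eq_true, decide_eq_true_eq] at h
  exact h

lemma pvLowerNat (u : Char) (h : 65 ≤ u.toNat ∧ u.toNat ≤ 90) :
    (PySem.Chars.lowerChar u).toNat = u.toNat + 32 := by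
  unfold PySem.Chars.lowerChar
  rw [if_pos (by
    unfold PySem.Chars.isupper
    simp only [Bool.and_eq_true, decide_eq_true_eq, Char.le_def, UInt32.le_iff_toNat_le]
    constructor <;> [exact h.1; exact h.2]), Char.toNat_ofNat, if_pos (Or.inl (by omega))]

lemma pvLower_not_mem : ∀ u ∈ "ABCDEFGHIJKLMNOPQRSTUVWXYZ".toList,
    PySem.Chars.lowerChar u ∉ "ABCDEFGHIJKLMNOPQRSTUVWXYZ".toList := by
  intro u hu hm
  have h1 := pvUpperBounds u hu
  have h2 := pvUpperBounds _ hm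
  have h3 := pvLowerNat u h1
  omega

-- per character, the 26 passes produce exactly A's inner branch value
set_option maxRecDepth 4096 in
lemma pvPerChar (c : Char) :
    "ABCDEFGHIJKLMNOPQRSTUVWXYZ".toList.foldl
        (fun l u => l.flatMap (pvRep u)) [c]
      = (if PySem.Set.contains pvUpperSet c
          then ['^', PySem.Chars.lowerChar c] else [c]) := by
  rw [pvFold_single _ c (by decide) pvLower_not_mem]
  have hm : PySem.Set.contains pvUpperSet c
      = decide (c ∈ "ABCDEFGHIJKLMNOPQRSTUVWXYZ".toList) := by
    rw [pvContains_eq]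
    simp [pvUpperSet, PySem.Set.mem_ofList]
  rw [hm]
  by_cases h : c ∈ "ABCDEFGHIJKLMNOPQRSTUVWXYZ".toList
  · rw [if_pos h, if_pos (decide_eq_true h)]
  · rw [if_neg h, if_neg (by simp only [decide_eq_true_eq]; exact h)]

-- B's fold of replace passes, written with flatMap
lemma pvFoldRepl (us : List Char) (l : List Char) :
    us.foldl (fun l u => PySem.Chars.replace l [u] ['^', PySem.Chars.lowerChar u]) l
      = us.foldl (fun l u => l.flatMap (pvRep u)) l := by
  simp only [pvReplace_single]
  rfl

-- the fold of per-letter passes acts independently on each character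
lemma pvFoldFM_decomp (us : List Char) :
    ∀ l : List Char,
      us.foldl (fun l u => l.flatMap (pvRep u)) l
        = l.flatMap (fun c => us.foldl (fun l u => l.flatMap (pvRep u)) [c]) := by
  induction us with
  | nil => intro l; simp
  | cons u us ih =>
    intro l
    simp only [List.foldl_cons]
    rw [ih (l.flatMap (pvRep u)), List.flatMap_assoc]
    congr 1
    funext c
    have hsing : List.flatMap (pvRep u) [c] = pvRep u c := by simp
    rw [hsing, ih (pvRep u c)]

-- A's fold is a flatMap of pvEmitA
lemma pvFoldA_eq (l : List Char) (acc : List Char) :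
    (l.foldl (fun acc c =>
      if PySem.Set.contains pvTokenSet c then
        if PySem.Set.contains pvUpperSet c then acc ++ ['^', PySem.Chars.lowerChar c]
        else acc ++ [c]
      else acc) acc)
    = acc ++ l.flatMap pvEmitA := by
  induction l generalizing acc with
  | nil => simp
  | cons c l ih =>
    have hstep : (if PySem.Set.contains pvTokenSet c then
        if PySem.Set.contains pvUpperSet c then acc ++ ['^', PySem.Chars.lowerChar c]
        else acc ++ [c] else acc) = acc ++ pvEmitA c := by
      unfold pvEmitA; split_ifs <;> simp
    simp only [List.foldl_cons]
    rw [hstep, ih]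
    simp

-- flatMap of pvEmitA factors through the filter
lemma pvFlatMap_filter (l : List Char) :
    l.flatMap pvEmitA
      = (l.filter (fun c => PySem.Set.contains pvTokenSet c)).flatMap
          (fun c => if PySem.Set.contains pvUpperSet c
            then ['^', PySem.Chars.lowerChar c] else [c]) := by
  induction l with
  | nil => simp
  | cons c l ih =>
    cases h : PySem.Set.contains pvTokenSet c with
    | true =>
      rw [List.flatMap_cons, List.filter_cons]
      simp only [pvEmitA, h]
      rw [ih]
      simp
    | false =>
      rw [List.flatMap_cons, List.filter_cons]
      simp only [pvEmitA, h]
      rw [ih]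
      simp

-- ===== VERDICT (by name: the statement is the Claim_ definition above) =====
theorem add_caseifer_spec : Claim_equal_add_caseifer := by
  intro text _
  unfold Spec_add_caseifer add_caseifer add_caseifer_alt
  rw [pvFoldA_eq text.toList []]
  simp only [List.nil_append]
  refine congrArg String.ofList ?_
  rw [pvFoldRepl, pvFoldFM_decomp, pvFlatMap_filter]
  refine pvFlatMap_congr_mem _ _ _ ?_
  intro c _
  exact (pvPerChar c).symm
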